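-- pv_equiv track=rewrite | github.com/rsleiberin/open-darf | scripts/phase7f/tri_state.py | combine_decisions
-- ===== SOURCE A (Python) =====
-- from enum import Enum
-- from typing import Iterable, Optional, Tuple, Dict, Any
--
-- class Decision(str, Enum):
--     ALLOW = "ALLOW"
--     DENY = "DENY"
--     INDETERMINATE = "INDETERMINATE"
--
-- def combine_decisions(decisions: Iterable[Decision]) -> Decision:
--     """Deny precedence: if any DENY -> DENY; elif all ALLOW -> ALLOW; else INDETERMINATE."""
--     has_deny = False
--     has_indet = False
--     has_allow = False
--     for d in decisions:
--         if d == Decision.DENY: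
--             has_deny = True
--         elif d == Decision.ALLOW:
--             has_allow = True
--         else:
--             has_indet = True
--     if has_deny:
--         return Decision.DENY
--     if has_allow and not has_indet:
--         return Decision.ALLOW
--     return Decision.INDETERMINATE
-- ===== SOURCE B (Python) =====
-- from enum import Enum
-- from typing import Iterable
--
-- class Decision(str, Enum):
--     ALLOW = "ALLOW"
--     DENY = "DENY"
--     INDETERMINATE = "INDETERMINATE"
--
-- _RANK = {Decision.DENY: 0, Decision.ALLOW: 2}
-- _BY_RANK = (Decision.DENY, Decision.INDETERMINATE, Decision.ALLOW)
--
-- def combine_decisions(decisions: Iterable[Decision]) -> Decision: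
--     """Deny precedence as a lattice meet: rank DENY=0 < INDETERMINATE=1 < ALLOW=2,
--     result is the minimum rank seen (empty -> INDETERMINATE)."""
--     ranks = [_RANK.get(d, 1) for d in decisions]
--     if not ranks:
--         return Decision.INDETERMINATE
--     return _BY_RANK[min(ranks)]
-- ===== Notes on version B (the rewrite author's own statement) =====
-- stated objective: alternative
-- what changed: Replaces the three boolean flags and final branch chain by a lattice-meet reduction: each decision is mapped to a numeric severity rank (DENY=0 < INDETERMINATE=1 < ALLOW=2) and the result is the decision of the minimum rank, empty input giving INDETERMINATE.
import Mathlib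
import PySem

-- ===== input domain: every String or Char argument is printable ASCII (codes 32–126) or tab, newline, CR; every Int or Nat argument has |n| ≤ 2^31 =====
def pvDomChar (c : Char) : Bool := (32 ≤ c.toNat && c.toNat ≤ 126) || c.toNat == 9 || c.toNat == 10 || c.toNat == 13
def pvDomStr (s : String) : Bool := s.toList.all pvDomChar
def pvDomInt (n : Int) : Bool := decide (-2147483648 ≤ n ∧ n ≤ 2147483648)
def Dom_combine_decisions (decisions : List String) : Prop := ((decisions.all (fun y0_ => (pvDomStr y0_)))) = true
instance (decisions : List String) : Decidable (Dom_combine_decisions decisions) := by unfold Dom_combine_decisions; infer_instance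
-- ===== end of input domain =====

-- B replaces A's three boolean flags by a lattice-meet reduction: rank DENY=0 < INDETERMINATE=1 < ALLOW=2, result = decision of the minimum rank (objective: alternative).

-- ===== PORT A =====
-- state: (has_deny, has_indet, has_allow)
def combine_decisions (decisions : List String) : String :=
  let st := decisions.foldl
    (fun (b : Bool × Bool × Bool) d =>
      if d = "DENY" then (true, b.2.1, b.2.2)
      else if d = "ALLOW" then (b.1, b.2.1, true)
      else (b.1, true, b.2.2))
    (false, false, false)
  if st.1 then "DENY"
  else if st.2.2 && !st.2.1 then "ALLOW"
  else "INDETERMINATE"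

-- ===== PORT B =====
-- _RANK.get(d, 1)
def pvRank (d : String) : Int := if d = "DENY" then 0 else if d = "ALLOW" then 2 else 1
-- _BY_RANK[m] for m ∈ {0,1,2} (tuple indexing by a rank that is always in range)
def pvByRank (m : Int) : String := if m = 0 then "DENY" else if m = 2 then "ALLOW" else "INDETERMINATE"

def combine_decisions_alt (decisions : List String) : String :=
  let ranks := decisions.map pvRank
  match PySem.List.min? ranks (fun x => x) with
  | none => "INDETERMINATE"
  | some m => pvByRank m

-- ===== PRECONDITION & SPEC =====
def Spec_combine_decisions (decisions : List String) (out : String) : Prop := out = combine_decisions_alt decisions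
instance (decisions : List String) (out : String) : Decidable (Spec_combine_decisions decisions out) := by unfold Spec_combine_decisions; infer_instance

-- ===== CLAIM (what is proved, stated in full; the proofs are below) =====
def Claim_equal_combine_decisions : Prop := ∀ (decisions : List String), Dom_combine_decisions decisions → Spec_combine_decisions decisions (combine_decisions decisions)

-- ===== LEMMAS AND PROOFS =====

-- the three flags after A's fold, from any initial state
theorem pv_fold_flags (l : List String) (b : Bool × Bool × Bool) :
    l.foldl
      (fun (b : Bool × Bool × Bool) d =>
        if d = "DENY" then (true, b.2.1, b.2.2)
        else if d = "ALLOW" then (b.1, b.2.1, true)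
        else (b.1, true, b.2.2))
      b
    = (b.1 || decide ("DENY" ∈ l),
       b.2.1 || decide (∃ x ∈ l, x ≠ "DENY" ∧ x ≠ "ALLOW"),
       b.2.2 || decide ("ALLOW" ∈ l)) := by
  induction l generalizing b with
  | nil => simp
  | cons x xs ih =>
    simp only [List.foldl_cons]
    by_cases hx : x = "DENY"
    · subst hx
      rw [if_pos rfl, ih]
      simp only [Prod.mk.injEq]
      refine ⟨?_, ?_, ?_⟩ <;> rw [Bool.eq_iff_iff] <;>
        simp [List.mem_cons]
    · by_cases hx2 : x = "ALLOW"
      · subst hx2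
        rw [if_neg hx, if_pos rfl, ih]
        simp only [Prod.mk.injEq]
        refine ⟨?_, ?_, ?_⟩ <;> rw [Bool.eq_iff_iff] <;>
          simp [List.mem_cons, hx]
      · rw [if_neg hx, if_neg hx2, ih]
        have hx' : ¬("DENY" = x) := fun h => hx h.symm
        have hx2' : ¬("ALLOW" = x) := fun h => hx2 h.symm
        simp only [Prod.mk.injEq]
        refine ⟨?_, ?_, ?_⟩ <;> rw [Bool.eq_iff_iff] <;>
          simp [List.mem_cons, hx, hx2, hx', hx2']

-- the running-min over the mapped ranks, from any accumulator
theorem pv_foldl_min_rank (xs : List String) (a : Int) :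
    (xs.map pvRank).foldl min a
    = if "DENY" ∈ xs then min a 0
      else if ∃ y ∈ xs, y ≠ "DENY" ∧ y ≠ "ALLOW" then min a 1
      else if "ALLOW" ∈ xs then min a 2
      else a := by
  induction xs generalizing a with
  | nil => simp
  | cons y ys ih =>
    simp only [List.map_cons, List.foldl_cons]
    rw [ih]
    by_cases hy : y = "DENY" <;> by_cases hy2 : y = "ALLOW" <;>
      by_cases hD : "DENY" ∈ ys <;>
      by_cases hI : ∃ z ∈ ys, z ≠ "DENY" ∧ z ≠ "ALLOW" <;>
      by_cases hA : "ALLOW" ∈ ys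
    all_goals simp_all [pvRank, List.mem_cons]
    all_goals (intro h; exact absurd h.symm (by assumption))

-- ===== VERDICT (by name: the statement is the Claim_ definition above) =====
theorem combine_decisions_spec : Claim_equal_combine_decisions := by
  intro l _
  unfold Spec_combine_decisions combine_decisions combine_decisions_alt
  simp only [pv_fold_flags, Bool.false_or]
  cases l with
  | nil => simp [PySem.List.min?]
  | cons x xs =>
    simp only [List.map_cons, PySem.List.min?_id_cons, pv_foldl_min_rank]
    by_cases hx : x = "DENY" <;> by_cases hx2 : x = "ALLOW" <;>
      by_cases hD : "DENY" ∈ xs <;>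
      by_cases hI : ∃ z ∈ xs, z ≠ "DENY" ∧ z ≠ "ALLOW" <;>
      by_cases hA : "ALLOW" ∈ xs
    all_goals simp_all [pvRank, pvByRank, List.mem_cons]
    all_goals try (split_ifs <;> simp_all)
    all_goals (intro h; exact absurd h.symm (by assumption))
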